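-- pv_equiv track=rewrite | github.com/oculi-s/Programmers | 선입 선출 스케쥴링.py | solution
-- ===== SOURCE A (Python) =====
-- def solution(n, cores):
--     a = []
--     for c in cores:
--         a += list(range(0,n+1,c))
--     b = {x:a.count(x) for x in range(n)}
--
--     v = 0
--     for x in b:
--         v += b[x]
--         if v >= n:
--             return x
-- ===== SOURCE B (Python) =====
-- def solution(n, cores):
--     def finished(x):
--         # jobs done by the end of minute x (0-indexed): each positive core c
--         # finishes x // c + 1 jobs in minutes 0..x
--         return sum(x // c + 1 for c in cores if c > 0)
--
--     if n <= 0 or finished(n - 1) < n: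
--         return None
--     lo, hi = 0, n - 1
--     while lo < hi:
--         mid = (lo + hi) // 2
--         if finished(mid) >= n:
--             hi = mid
--         else:
--             lo = mid + 1
--     return lo
-- ===== Notes on version B (the rewrite author's own statement) =====
-- stated objective: faster
-- what changed: Replaces building the concatenated multiples list, counting it once per time step and scanning cumulatively, by a closed-form finished-jobs count sum(x//c+1) and a binary search on time for the first minute reaching n.
import Mathlib
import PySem

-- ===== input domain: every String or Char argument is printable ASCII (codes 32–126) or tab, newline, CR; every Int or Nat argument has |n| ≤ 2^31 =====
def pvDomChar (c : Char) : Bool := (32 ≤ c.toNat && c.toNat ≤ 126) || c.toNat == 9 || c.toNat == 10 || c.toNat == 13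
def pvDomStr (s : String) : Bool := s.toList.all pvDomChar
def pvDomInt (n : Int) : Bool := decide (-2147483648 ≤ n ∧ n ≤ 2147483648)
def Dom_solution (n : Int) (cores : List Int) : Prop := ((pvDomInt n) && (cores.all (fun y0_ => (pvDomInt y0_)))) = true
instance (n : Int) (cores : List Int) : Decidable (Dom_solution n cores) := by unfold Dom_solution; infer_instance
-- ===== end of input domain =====

-- B replaces A's build-a-list-of-all-finish-times-and-count-it scan by a closed-form
-- finished-jobs count and a binary search on time (objective: faster, asymptotic).

-- ===== PORT A =====
-- the final 'for x in b: v += b[x]; if v >= n: return x' loop of A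
def solLoop (n : Int) : List (Int × Int) → Int → Option Int
  | [], _ => none
  | (x, cnt) :: rest, v =>
    if n ≤ v + cnt then some x else solLoop n rest (v + cnt)

def solution (n : Int) (cores : List Int) : Option Int :=
  let a : List Int := cores.foldl (fun acc c => acc ++ PySem.List.pyRange 0 (n+1) c) []
  -- dict comprehension over the distinct keys range(n): exactly this items list
  let b : PySem.Dict Int Int :=
    PySem.Dict.mk ((PySem.List.pyRange 0 n 1).map (fun x => (x, (PySem.List.count a x : Int))))
  solLoop n b.items 0

-- ===== PORT B =====
-- finished(x) = sum(x // c + 1 for c in cores if c > 0)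
def altFinished (cores : List Int) (x : Int) : Int :=
  cores.foldl (fun s c => if 0 < c then s + (PySem.Int.floordiv x c + 1) else s) 0

-- the 'while lo < hi' binary-search loop of B (fuel bounds the iteration count;
-- (hi - lo).toNat iterations always suffice, see search_spec)
def altSearch (n : Int) (cores : List Int) : Nat → Int → Int → Int
  | 0, lo, _ => lo
  | fuel + 1, lo, hi =>
    if lo < hi then
      let mid := PySem.Int.floordiv (lo + hi) 2
      if n ≤ altFinished cores mid then altSearch n cores fuel lo mid
      else altSearch n cores fuel (mid + 1) hi
    else lo

def solution_alt (n : Int) (cores : List Int) : Option Int :=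
  if n ≤ 0 then none
  else if altFinished cores (n - 1) < n then none
  else some (altSearch n cores (n - 1).toNat 0 (n - 1))

-- ===== PRECONDITION & SPEC =====
-- Pre_ excludes cores containing 0, the only inputs on which A raises (ValueError: range() step 0).
def Pre_solution (_n : Int) (cores : List Int) : Prop := (0 : Int) ∉ cores
instance (n : Int) (cores : List Int) : Decidable (Pre_solution n cores) := by unfold Pre_solution; infer_instance
def pvWitness_solution : Int × List Int := (6, [1, 2])

def Spec_solution (n : Int) (cores : List Int) (out : Option Int) : Prop := out = solution_alt n cores
instance (n : Int) (cores : List Int) (out : Option Int) : Decidable (Spec_solution n cores out) := by unfold Spec_solution; infer_instance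

-- ===== CLAIM (what is proved, stated in full; the proofs are below) =====
def Claim_equal_solution : Prop := ∀ (n : Int) (cores : List Int), Dom_solution n cores → Pre_solution n cores → Spec_solution n cores (solution n cores)
-- ===== LEMMAS AND PROOFS =====

-- finished-count as a sum over the cores
theorem altFinished_eq_sum (cores : List Int) (x : Int) :
    altFinished cores x = (cores.map (fun c => if 0 < c then PySem.Int.floordiv x c + 1 else 0)).sum := by
  unfold altFinished
  have hfun : (fun (s c : Int) => if 0 < c then s + (PySem.Int.floordiv x c + 1) else s) =
      (fun (s c : Int) => s + if 0 < c then PySem.Int.floordiv x c + 1 else 0) := by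
    funext s c; split <;> simp
  rw [hfun, PySem.List.foldl_add]
  simp

-- floor division by a positive divisor is monotone in the numerator
theorem floordiv_mono {x y c : Int} (hc : 0 < c) (hxy : x ≤ y) :
    PySem.Int.floordiv x c ≤ PySem.Int.floordiv y c := by
  rw [PySem.Int.floordiv_eq_ediv_of_pos hc, PySem.Int.floordiv_eq_ediv_of_pos hc]
  exact Int.ediv_le_ediv hc hxy

theorem altFinished_mono (cores : List Int) {x y : Int} (hxy : x ≤ y) :
    altFinished cores x ≤ altFinished cores y := by
  rw [altFinished_eq_sum, altFinished_eq_sum]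
  induction cores with
  | nil => simp
  | cons c cs ih =>
    simp only [List.map_cons, List.sum_cons]
    have : (if 0 < c then PySem.Int.floordiv x c + 1 else 0) ≤
        (if 0 < c then PySem.Int.floordiv y c + 1 else 0) := by
      split
      · have := floordiv_mono (by assumption) hxy; omega
      · exact le_refl 0
    omega

theorem altFinished_neg_one (cores : List Int) : altFinished cores (-1) = 0 := by
  rw [altFinished_eq_sum]
  induction cores with
  | nil => simp
  | cons c cs ih =>
    simp only [List.map_cons, List.sum_cons, ih]
    have hz : (if 0 < c then PySem.Int.floordiv (-1) c + 1 else 0) = 0 := by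
      split
      · next hc =>
        have hfd : PySem.Int.floordiv (-1) c = -1 :=
          (PySem.Int.floordiv_eq_iff_of_pos hc).mpr ⟨by omega, by omega⟩
        omega
      · rfl
    omega

-- per-core: how many times t occurs in range(0, n+1, c)
theorem count_pyRange_core {n t c : Int} (hc : c ≠ 0) (ht0 : 0 ≤ t) (htn : t < n) :
    ((PySem.List.pyRange 0 (n+1) c).count t : Int) =
      (if 0 < c then PySem.Int.floordiv t c + 1 else 0) -
      (if 0 < c then PySem.Int.floordiv (t-1) c + 1 else 0) := by
  rcases lt_trichotomy c 0 with hneg | hz | hpos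
  · rw [PySem.List.pyRange_of_neg 0 (n+1) hneg]
    have : ¬ ((n:Int)+1 < 0) := by omega
    simp [this, hneg.not_gt]
  · exact absurd hz hc
  · simp only [if_pos hpos]
    have hdvd_iff : t ∈ PySem.List.pyRange 0 (n+1) c ↔ c ∣ t := by
      rw [PySem.List.mem_pyRange_iff_of_pos hpos]
      constructor
      · rintro ⟨_, _, h⟩; simpa using h
      · intro h; exact ⟨ht0, by omega, by simpa using h⟩
    have hnodup : (PySem.List.pyRange 0 (n+1) c).Nodup := by
      rw [PySem.List.pyRange_of_pos 0 (n+1) hpos]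
      apply List.Nodup.map _ (List.nodup_range)
      intro a b hab
      simp only [zero_add] at hab
      exact Nat.cast_injective (mul_left_cancel₀ (by omega) hab)
    have hstep : PySem.Int.floordiv t c - PySem.Int.floordiv (t-1) c = if c ∣ t then 1 else 0 := by
      by_cases hd : c ∣ t
      · rw [if_pos hd]
        obtain ⟨m, hm⟩ := hd
        have e1 : m * c = c * m := mul_comm m c
        have e2 : (m - 1 + 1) * c = m * c := by ring
        have e3 : (m - 1) * c = m * c - c := by ring
        have hqm : PySem.Int.floordiv t c = m :=
          (PySem.Int.floordiv_eq_iff_of_pos hpos).mpr ⟨by linarith, by linarith⟩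
        have hq'm : PySem.Int.floordiv (t-1) c = m - 1 :=
          (PySem.Int.floordiv_eq_iff_of_pos hpos).mpr ⟨by linarith, by linarith⟩
        rw [hqm, hq'm]; ring
      · rw [if_neg hd]
        have hq := (PySem.Int.floordiv_eq_iff_of_pos (a := t) hpos).mp rfl
        set q := PySem.Int.floordiv t c with hqdef
        have hne : q * c ≠ t := fun h => hd ⟨q, by linarith [mul_comm q c]⟩
        have e1 : (q + 1) * c = q * c + c := by ring
        have hle : q * c ≤ t - 1 := by
          rcases lt_or_eq_of_le hq.1 with h | h
          · omega
          · exact absurd h hne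
        have hq' : PySem.Int.floordiv (t-1) c = q :=
          (PySem.Int.floordiv_eq_iff_of_pos hpos).mpr ⟨hle, by linarith⟩
        rw [hq']; ring
    by_cases hmem : c ∣ t
    · rw [List.count_eq_one_of_mem hnodup (hdvd_iff.mpr hmem)]
      rw [if_pos hmem] at hstep
      omega
    · rw [List.count_eq_zero.mpr (fun h => hmem (hdvd_iff.mp h))]
      rw [if_neg hmem] at hstep
      omega

-- the count of t in A's concatenated list is the per-minute finished increment
theorem count_a_eq {n t : Int} (cores : List Int) (hpre : (0:Int) ∉ cores)
    (ht0 : 0 ≤ t) (htn : t < n) :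
    ((cores.foldl (fun acc c => acc ++ PySem.List.pyRange 0 (n+1) c) []).count t : Int) =
      altFinished cores t - altFinished cores (t-1) := by
  rw [PySem.List.foldl_append_eq_flatMap, List.nil_append,
    altFinished_eq_sum, altFinished_eq_sum]
  induction cores with
  | nil => simp
  | cons c cs ih =>
    have hc : c ≠ 0 := fun h => hpre (h ▸ List.mem_cons_self)
    have hcs : (0:Int) ∉ cs := fun h => hpre (List.mem_cons_of_mem _ h)
    simp only [List.flatMap_cons, List.count_append, List.map_cons, List.sum_cons]
    push_cast
    rw [ih hcs]
    have := count_pyRange_core (n := n) (t := t) hc ht0 htn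
    omega

-- A's scan loop: returns the first minute t ≤ x < n with altFinished ≥ n, else none
theorem loop_spec (n : Int) (cores : List Int) (g : Int → Int)
    (hg : ∀ x, 0 ≤ x → x < n → g x = altFinished cores x - altFinished cores (x-1)) :
    ∀ (k : Nat) (t : Int), 0 ≤ t → (n - t).toNat = k →
    (solLoop n ((PySem.List.pyRange t n 1).map (fun x => (x, g x)))
        (altFinished cores (t-1)) = none ∧ (∀ y, t ≤ y → y < n → altFinished cores y < n))
    ∨ (∃ z, solLoop n ((PySem.List.pyRange t n 1).map (fun x => (x, g x)))
        (altFinished cores (t-1)) = some z ∧ t ≤ z ∧ z < n ∧ n ≤ altFinished cores z ∧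
        (∀ y, t ≤ y → y < z → altFinished cores y < n)) := by
  intro k
  induction k with
  | zero =>
    intro t ht0 hk
    have htn : n ≤ t := by omega
    rw [PySem.List.pyRange_one_eq_nil htn]
    exact Or.inl ⟨rfl, fun y hy1 hy2 => absurd (lt_of_le_of_lt hy1 hy2) (not_lt.mpr htn)⟩
  | succ k ih =>
    intro t ht0 hk
    have htn : t < n := by omega
    rw [PySem.List.pyRange_one_cons htn, List.map_cons]
    have hsum : altFinished cores (t-1) + g t = altFinished cores t := by
      rw [hg t ht0 htn]; omega
    simp only [solLoop, hsum]
    by_cases hge : n ≤ altFinished cores t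
    · rw [if_pos hge]
      exact Or.inr ⟨t, rfl, le_refl t, htn, hge, fun y hy1 hy2 => absurd (lt_of_le_of_lt hy1 hy2) (lt_irrefl t)⟩
    · rw [if_neg hge]
      have := ih (t+1) (by omega) (by omega)
      have harg : altFinished cores t = altFinished cores ((t+1)-1) := by norm_num
      rw [harg]
      rcases this with ⟨hnone, hall⟩ | ⟨z, hsome, hz1, hz2, hz3, hall⟩
      · exact Or.inl ⟨hnone, fun y hy1 hy2 => by
          rcases eq_or_lt_of_le hy1 with h | h
          · exact h ▸ (not_le.mp hge)
          · exact hall y (by omega) hy2⟩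
      · exact Or.inr ⟨z, hsome, by omega, hz2, hz3, fun y hy1 hy2 => by
          rcases eq_or_lt_of_le hy1 with h | h
          · exact h ▸ (not_le.mp hge)
          · exact hall y (by omega) hy2⟩

-- B's binary search returns the least minute in [lo, hi] with altFinished ≥ n
theorem search_spec (n : Int) (cores : List Int) :
    ∀ (k : Nat) (lo hi : Int), lo ≤ hi → n ≤ altFinished cores hi → (hi - lo).toNat ≤ k →
    lo ≤ altSearch n cores k lo hi ∧ altSearch n cores k lo hi ≤ hi ∧
    n ≤ altFinished cores (altSearch n cores k lo hi) ∧
    (∀ y, lo ≤ y → y < altSearch n cores k lo hi → altFinished cores y < n) := by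
  intro k
  induction k with
  | zero =>
    intro lo hi hle hF hk
    have : lo = hi := by omega
    subst this
    exact ⟨le_refl lo, le_refl lo, hF, fun y h1 h2 => absurd (lt_of_le_of_lt h1 h2) (lt_irrefl lo)⟩
  | succ k ih =>
    intro lo hi hle hF hk
    rcases eq_or_lt_of_le hle with heq | hlt
    · subst heq
      simp only [altSearch, if_neg (lt_irrefl lo)]
      exact ⟨le_refl lo, le_refl lo, hF, fun y h1 h2 => absurd (lt_of_le_of_lt h1 h2) (lt_irrefl lo)⟩
    · simp only [altSearch, if_pos hlt]
      have hmid := PySem.Int.floordiv_two_mid_bounds (le_of_lt hlt)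
      have hmidlt : PySem.Int.floordiv (lo + hi) 2 < hi :=
        (PySem.Int.floordiv_lt_iff_lt_mul (by norm_num : (0:Int) < 2)).mpr (by omega)
      set mid := PySem.Int.floordiv (lo + hi) 2 with hmiddef
      by_cases hge : n ≤ altFinished cores mid
      · rw [if_pos hge]
        have h := ih lo mid hmid.1 hge (by omega)
        exact ⟨h.1, le_trans h.2.1 (le_of_lt hmidlt), h.2.2⟩
      · rw [if_neg hge]
        have h := ih (mid+1) hi (by omega) hF (by omega)
        refine ⟨by omega, h.2.1, h.2.2.1, fun y h1 h2 => ?_⟩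
        by_cases hy : y ≤ mid
        · calc altFinished cores y ≤ altFinished cores mid := altFinished_mono cores hy
            _ < n := not_le.mp hge
        · exact h.2.2.2 y (by omega) h2

-- ===== VERDICT (by name: the statement is the Claim_ definition above) =====
theorem solution_spec : Claim_equal_solution := by
  intro n cores _ hpre
  unfold Spec_solution solution solution_alt
  simp only []
  by_cases hn : n ≤ 0
  · rw [PySem.List.pyRange_one_eq_nil (by omega), if_pos hn]
    rfl
  · rw [if_neg hn]
    have hF0 : altFinished cores (0-1) = 0 := by norm_num [altFinished_neg_one]
    have hloop := loop_spec n cores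
      (fun x => ((cores.foldl (fun acc c => acc ++ PySem.List.pyRange 0 (n+1) c) []).count x : Int))
      (fun x hx0 hxn => by
        simpa [PySem.List.count] using count_a_eq (n := n) (t := x) cores hpre hx0 hxn)
      (n - 0).toNat 0 (le_refl 0) rfl
    rw [hF0] at hloop
    by_cases hlast : altFinished cores (n-1) < n
    · rw [if_pos hlast]
      rcases hloop with ⟨hnone, _⟩ | ⟨z, hsome, hz1, hz2, hz3, _⟩
      · simpa [PySem.List.count] using hnone
      · exfalso
        have : altFinished cores z ≤ altFinished cores (n-1) := altFinished_mono cores (by omega)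
        omega
    · rw [if_neg hlast]
      have hsearch := search_spec n cores (n-1).toNat 0 (n-1) (by omega) (not_lt.mp hlast) (by omega)
      rcases hloop with ⟨_, hall⟩ | ⟨z, hsome, hz1, hz2, hz3, hall⟩
      · exact absurd (hall (n-1) (by omega) (by omega)) (not_lt.mpr (not_lt.mp hlast))
      · have heq : z = altSearch n cores (n-1).toNat 0 (n-1) := by
          rcases lt_trichotomy z (altSearch n cores (n-1).toNat 0 (n-1)) with h | h | h
          · exact absurd hz3 (not_le.mpr (hsearch.2.2.2 z hz1 h))
          · exact h
          · exact absurd hsearch.2.2.1 (not_le.mpr (hall _ (by omega) h))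
        rw [← heq]
        simpa [PySem.List.count] using hsome
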